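-- pv_equiv track=rewrite | github.com/Nick806/py-Battleship | Bots/NickBot_V1.py | legal_moves_list
-- ===== SOURCE A (Python) =====
-- def create_table(rows, columns, elements):
--     """
--     Creates a 2D table (list of lists) with the specified number of rows and columns,
--     filling each cell with the provided elements.
--
--     Parameters:
--     - rows (int): The number of rows in the table.
--     - columns (int): The number of columns in the table.
--     - elements: The value to be placed in each cell of the table.
--
--     Returns:
--     - list: A 2D table represented as a list of lists.
--     """
--     table = [[elements for _ in range(columns)] for _ in range(rows)]
--     return table
--
-- def legal_moves_table(attack_table):
--     """
--     Generates a table indicating legal moves for attacks.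
--
--     Parameters:
--     - attack_table (list): The table representing the state of attacks, where "O" denotes an unattacked position.
--
--     Returns:
--     - list: A 2D table with legal moves marked as 1 and non-legal moves marked as 0.
--     """
--     legal_moves = create_table(len(attack_table), len(attack_table[0]), 0)
--
--     for row in range(len(legal_moves)):
--         for col in range(len(legal_moves[0])):
--             if attack_table[row][col] == "O":
--                 legal_moves[row][col] = 1
--
--     return legal_moves
--
-- def legal_moves_list(attack_table):
--     """
--     Generates a list of legal moves for attacks.
--
--     Parameters:
--     - attack_table (list): The table representing the state of attacks, where "O" denotes an unattacked position.
--
--     Returns: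
--     - list: A list of coordinates representing legal moves.
--     """
--     legal_moves_tab = legal_moves_table(attack_table)
--     legal_moves_list = []
--
--     for row in range(len(legal_moves_tab)):
--         for col in range(len(legal_moves_tab[0])):
--             if legal_moves_tab[row][col] == 1:
--                 legal_moves_list.append([row + 1, col + 1])
--
--     return legal_moves_list
-- ===== SOURCE B (Python) =====
-- def legal_moves_list(attack_table):
--     cols = len(attack_table[0])
--     return [[row + 1, col + 1]
--             for row, cells in enumerate(attack_table)
--             for col in range(cols)
--             if cells[col] == "O"]
-- ===== Notes on version B (the rewrite author's own statement) =====
-- stated objective: simpler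
-- what changed: Drops the intermediate 0/1 mask table (and its two helper functions) entirely: one comprehension pass over enumerate(attack_table) collects the 1-indexed coordinates of 'O' cells directly.
import Mathlib
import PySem

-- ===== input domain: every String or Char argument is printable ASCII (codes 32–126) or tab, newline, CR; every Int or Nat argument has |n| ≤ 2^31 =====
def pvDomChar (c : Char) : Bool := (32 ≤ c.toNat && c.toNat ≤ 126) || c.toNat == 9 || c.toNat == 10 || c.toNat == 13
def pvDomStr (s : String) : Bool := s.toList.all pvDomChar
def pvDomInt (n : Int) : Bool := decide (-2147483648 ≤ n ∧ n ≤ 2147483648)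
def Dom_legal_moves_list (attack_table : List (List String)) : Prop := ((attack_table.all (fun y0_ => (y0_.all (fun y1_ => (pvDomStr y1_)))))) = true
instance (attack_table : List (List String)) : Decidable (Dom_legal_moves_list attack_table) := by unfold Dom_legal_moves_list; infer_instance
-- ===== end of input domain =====

-- B drops A's intermediate 0/1 mask table and its helpers: one pass collects the 1-indexed coordinates of "O" cells directly (objective: simpler).

-- ===== PORT A =====
def create_table (rows columns : Nat) (elements : Int) : List (List Int) :=
  (List.range rows).map (fun _ => (List.range columns).map (fun _ => elements))

def legal_moves_table (attack_table : List (List String)) : List (List Int) :=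
  (List.range attack_table.length).foldl (fun lm row =>
    (List.range ((attack_table.headD []).length)).foldl (fun lm col =>
      if (attack_table.getD row []).getD col "" == "O"
      then lm.modify row (fun r => r.set col 1) else lm) lm)
    (create_table attack_table.length (attack_table.headD []).length 0)

def legal_moves_list (attack_table : List (List String)) : List (List Int) :=
  (List.range (legal_moves_table attack_table).length).foldl (fun acc row =>
    (List.range (((legal_moves_table attack_table).headD []).length)).foldl (fun acc col =>
      if ((legal_moves_table attack_table).getD row []).getD col 0 == 1
      then acc ++ [[(row : Int) + 1, (col : Int) + 1]] else acc) acc) []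

-- ===== PORT B =====
def legal_moves_list_alt (attack_table : List (List String)) : List (List Int) :=
  (PySem.List.enumerate attack_table).flatMap (fun p =>
    ((List.range ((attack_table.headD []).length)).filter (fun col => p.2.getD col "" == "O")).map
      (fun (col : Nat) => [p.1 + 1, (col : Int) + 1]))

-- ===== PRECONDITION & SPEC =====
-- A (and B) raise IndexError on an empty table (len(attack_table[0])) and when some row is
-- shorter than the first row (attack_table[row][col] out of range); Pre_ excludes exactly those.
def Pre_legal_moves_list (attack_table : List (List String)) : Prop :=
  attack_table ≠ [] ∧ ∀ row ∈ attack_table, (attack_table.headD []).length ≤ row.length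
instance (attack_table : List (List String)) : Decidable (Pre_legal_moves_list attack_table) := by
  unfold Pre_legal_moves_list; infer_instance
def pvWitness_legal_moves_list : List (List String) := [["O", "X"], ["X", "O"]]

def Spec_legal_moves_list (attack_table : List (List String)) (out : List (List Int)) : Prop := out = legal_moves_list_alt attack_table
instance (attack_table : List (List String)) (out : List (List Int)) : Decidable (Spec_legal_moves_list attack_table out) := by unfold Spec_legal_moves_list; infer_instance

-- ===== CLAIM (what is proved, stated in full; the proofs are below) =====
def Claim_equal_legal_moves_list : Prop := ∀ (attack_table : List (List String)), Dom_legal_moves_list attack_table → Pre_legal_moves_list attack_table → Spec_legal_moves_list attack_table (legal_moves_list attack_table)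

-- ===== LEMMAS AND PROOFS =====

-- the canonical form both ports reduce to
def pvCanon (attack_table : List (List String)) : List (List Int) :=
  (List.range attack_table.length).flatMap (fun row =>
    ((List.range ((attack_table.headD []).length)).filter
        (fun col => (attack_table.getD row []).getD col "" == "O")).map
      (fun (col : Nat) => [(row : Int) + 1, (col : Int) + 1]))

theorem foldl_ext {A B : Type} (l : List A) (f g : B → A → B) (init : B)
    (h : ∀ acc x, f acc x = g acc x) : l.foldl f init = l.foldl g init := by
  have hfg : f = g := funext fun a => funext fun x => h a x
  rw [hfg]

theorem foldl_mem_congr {A B : Type} :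
    ∀ (l : List A) (f g : B → A → B) (init : B),
      (∀ acc, ∀ x ∈ l, f acc x = g acc x) → l.foldl f init = l.foldl g init := by
  intro l
  induction l with
  | nil => intro f g init h; rfl
  | cons a l ih =>
    intro f g init h
    rw [List.foldl_cons, h init a (by simp), List.foldl_cons]
    exact ih f g _ (fun acc x hx => h acc x (by simp [hx]))

-- ---- B-side ----
theorem alt_eq_canon (at_ : List (List String)) :
    legal_moves_list_alt at_ = pvCanon at_ := by
  have henum : PySem.List.enumerate at_ 0
      = (List.range at_.length).map (fun (j : Nat) => ((j : Int), at_.getD j [])) := by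
    apply List.ext_getElem
    · simp [PySem.List.length_enumerate]
    · intro k h1 h2
      have hk : k < at_.length := by simpa [PySem.List.length_enumerate] using h1
      simp [PySem.List.getElem_enumerate, List.getD_eq_getElem?_getD,
        List.getElem?_eq_getElem, hk]
  simp only [legal_moves_list_alt, pvCanon, henum, List.flatMap_map, Function.comp]

-- ---- A-side: collapse the per-column modifies into one modify ----
theorem modify_modify {A : Type} (l : List A) (i : Nat) (f g : A → A) :
    (l.modify i f).modify i g = l.modify i (fun x => g (f x)) := by
  apply List.ext_getElem
  · simp
  · intro k h1 h2
    simp only [List.getElem_modify]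
    split_ifs <;> simp_all [List.getElem_modify]

theorem modify_id {A : Type} (l : List A) (i : Nat) :
    l.modify i (fun x => x) = l := by
  apply List.ext_getElem
  · simp
  · intro k h1 h2
    simp only [List.getElem_modify]
    split_ifs <;> rfl

theorem inner_collapse (P : Nat → Bool) (row : Nat) :
    ∀ (l : List Nat) (lm : List (List Int)),
      l.foldl (fun lm col => if P col then lm.modify row (fun r => r.set col 1) else lm) lm
        = lm.modify row (fun r => l.foldl (fun r col => if P col then r.set col 1 else r) r) := by
  intro l
  induction l with
  | nil => intro lm; exact (modify_id lm row).symm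
  | cons a l ih =>
    intro lm
    by_cases h : P a = true
    · simp [h, ih, modify_modify]
    · simp [List.foldl_cons, h, ih]

theorem set_fold_length (P : Nat → Bool) :
    ∀ (l : List Nat) (r : List Int),
      (l.foldl (fun r col => if P col then r.set col 1 else r) r).length = r.length := by
  intro l
  induction l with
  | nil => intro r; rfl
  | cons a l ih => intro r; by_cases h : P a = true <;> simp [h, ih]

theorem set_fold_getD (P : Nat → Bool) :
    ∀ (l : List Nat) (r : List Int) (c : Nat), c < r.length →
      (l.foldl (fun r col => if P col then r.set col 1 else r) r).getD c 0
        = if c ∈ l ∧ P c = true then 1 else r.getD c 0 := by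
  intro l
  induction l with
  | nil => intro r c hc; simp
  | cons a l ih =>
    intro r c hc
    rw [List.foldl_cons]
    by_cases h : P a = true
    · rw [if_pos h, ih _ _ (by simpa using hc)]
      have hset : (r.set a 1).getD c 0 = if c = a then 1 else r.getD c 0 := by
        by_cases hca : c = a
        · subst hca; simp [List.getD_eq_getElem?_getD, List.getElem?_set_self, hc]
        · simp [List.getD_eq_getElem?_getD, List.getElem?_set_ne (Ne.symm hca), hca]
      rw [hset]
      by_cases hcP : P c = true
      · by_cases hca : c = a <;> by_cases hcl : c ∈ l <;> simp_all
      · have hca : c ≠ a := fun e => hcP (e ▸ h)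
        simp_all
    · rw [if_neg h, ih _ _ hc]
      by_cases hcP : P c = true
      · have hca : c ≠ a := fun e => h (e ▸ hcP)
        simp [hcP, hca]
      · simp [hcP]

theorem mapIdx_modify {A : Type} (l : List A) (f : Nat → A → A) (k : Nat) (g : A → A) :
    (l.mapIdx f).modify k g = l.mapIdx (fun i x => if i = k then g (f i x) else f i x) := by
  apply List.ext_getElem
  · simp
  · intro j h1 h2
    simp only [List.getElem_modify, List.getElem_mapIdx]
    split_ifs <;> simp_all

theorem foldl_modify_mapIdx {A : Type} (F : Nat → A → A) :
    ∀ (k : Nat) (l : List A),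
      (List.range k).foldl (fun lm row => lm.modify row (F row)) l
        = l.mapIdx (fun i x => if i < k then F i x else x) := by
  intro k
  induction k with
  | zero => intro l; apply List.ext_getElem <;> simp
  | succ k ih =>
    intro l
    rw [List.range_succ, List.foldl_append, List.foldl_cons, List.foldl_nil, ih,
      mapIdx_modify]
    apply List.mapIdx_eq_mapIdx_iff.mpr
    intro i h
    by_cases h1 : i = k
    · simp [h1]
    · by_cases h2 : i < k <;> simp [h1, h2] <;> omega

-- the mask table, characterised
theorem tab_length (at_ : List (List String)) :
    (legal_moves_table at_).length = at_.length := by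
  unfold legal_moves_table
  rw [foldl_ext (List.range at_.length) _
    (fun lm row => lm.modify row (fun r =>
      (List.range ((at_.headD []).length)).foldl
        (fun r col => if (at_.getD row []).getD col "" == "O" then r.set col 1 else r) r))
    (create_table at_.length (at_.headD []).length 0)
    (fun lm row => inner_collapse (fun col => (at_.getD row []).getD col "" == "O") row _ lm)]
  rw [foldl_modify_mapIdx]
  simp [create_table]

theorem tab_row (at_ : List (List String)) (row : Nat) (hrow : row < at_.length) :
    (legal_moves_table at_).getD row []
      = (List.range ((at_.headD []).length)).foldl
          (fun r col => if (at_.getD row []).getD col "" == "O" then r.set col 1 else r)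
          ((List.range ((at_.headD []).length)).map (fun _ => (0 : Int))) := by
  unfold legal_moves_table
  rw [foldl_ext (List.range at_.length) _
    (fun lm row => lm.modify row (fun r =>
      (List.range ((at_.headD []).length)).foldl
        (fun r col => if (at_.getD row []).getD col "" == "O" then r.set col 1 else r) r))
    (create_table at_.length (at_.headD []).length 0)
    (fun lm row => inner_collapse (fun col => (at_.getD row []).getD col "" == "O") row _ lm)]
  rw [foldl_modify_mapIdx]
  have hlen : (create_table at_.length (at_.headD []).length 0).length = at_.length := by
    simp [create_table]
  rw [List.getD_eq_getElem?_getD, List.getElem?_eq_getElem (by simp [create_table, hrow])]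
  simp [List.getElem_mapIdx, create_table, hrow]

theorem tab_row_length (at_ : List (List String)) (row : Nat) (hrow : row < at_.length) :
    ((legal_moves_table at_).getD row []).length = (at_.headD []).length := by
  rw [tab_row at_ row hrow, set_fold_length]; simp

theorem tab_head_length (at_ : List (List String)) (h : at_ ≠ []) :
    ((legal_moves_table at_).headD []).length = (at_.headD []).length := by
  have h0 : 0 < at_.length := List.length_pos_iff.mpr h
  have hh : (legal_moves_table at_).headD [] = (legal_moves_table at_).getD 0 [] := by
    cases htab : legal_moves_table at_ with
    | nil =>
      exfalso
      have := tab_length at_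
      rw [htab] at this
      simp at this
      omega
    | cons a l => simp
  rw [hh, tab_row_length at_ 0 h0]

theorem tab_getD (at_ : List (List String)) (row col : Nat)
    (hrow : row < at_.length) (hcol : col < (at_.headD []).length) :
    ((legal_moves_table at_).getD row []).getD col 0
      = if (at_.getD row []).getD col "" == "O" then (1 : Int) else 0 := by
  rw [tab_row at_ row hrow,
    set_fold_getD _ _ _ _ (by simpa using hcol)]
  by_cases hc : (at_.getD row []).getD col "" == "O" <;>
    simp_all [List.getD_eq_getElem?_getD, List.headD_eq_head?_getD]

-- ---- A-side scan reduces to the canonical form ----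
theorem a_eq_canon (at_ : List (List String)) (h : at_ ≠ []) :
    legal_moves_list at_ = pvCanon at_ := by
  unfold legal_moves_list pvCanon
  rw [tab_length, tab_head_length at_ h]
  rw [foldl_mem_congr (List.range at_.length)
      (fun acc row =>
        (List.range ((at_.headD []).length)).foldl (fun acc col =>
          if ((legal_moves_table at_).getD row []).getD col 0 == 1
          then acc ++ [[(row : Int) + 1, (col : Int) + 1]] else acc) acc)
      (fun acc row =>
        acc ++ ((List.range ((at_.headD []).length)).filter
            (fun col => (at_.getD row []).getD col "" == "O")).map
          (fun (col : Nat) => [(row : Int) + 1, (col : Int) + 1])) []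
      (fun acc row hrow => by
        rw [List.mem_range] at hrow
        dsimp only
        rw [foldl_mem_congr (List.range ((at_.headD []).length))
            (fun acc col =>
              if ((legal_moves_table at_).getD row []).getD col 0 == 1
              then acc ++ [[(row : Int) + 1, (col : Int) + 1]] else acc)
            (fun acc col =>
              if (at_.getD row []).getD col "" == "O"
              then acc ++ [[(row : Int) + 1, (col : Int) + 1]] else acc) acc
            (fun acc' col hcol => by
              rw [List.mem_range] at hcol
              dsimp only
              rw [tab_getD at_ row col hrow hcol]
              by_cases hcond : (at_.getD row []).getD col "" == "O" <;> simp [hcond])]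
        rw [PySem.List.foldl_append_if])]
  rw [PySem.List.foldl_append_eq_flatMap]
  simp

-- ===== VERDICT (by name: the statement is the Claim_ definition above) =====
theorem legal_moves_list_spec : Claim_equal_legal_moves_list := by
  intro at_ _ hpre
  unfold Spec_legal_moves_list
  rw [a_eq_canon at_ hpre.1, alt_eq_canon]
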